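-- pv_equiv track=rewrite | github.com/Marichka0701/labs-python-spec-prog-lang | lab-4/DAL/functions/artFunctions.py | changeSymbol
-- ===== SOURCE A (Python) =====
-- def changeSymbol(art, symbol):
--     updated_art = ""
--     for char in art:
--         if char != '\n' and char != ' ':
--             updated_art += symbol
--         else:
--             updated_art += char
--     return updated_art
-- ===== SOURCE B (Python) =====
-- def changeSymbol(art, symbol):
--     table = {ord(c): symbol for c in set(art) if c != '\n' and c != ' '}
--     return art.translate(table)
-- ===== Notes on version B (the rewrite author's own statement) =====
-- stated objective: idiomatic
-- what changed: B builds a translation table (ord(c) -> symbol) over the distinct non-whitespace characters of art and applies str.translate in one pass, instead of A's per-character loop-and-branch with string concatenation.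
import Mathlib
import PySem

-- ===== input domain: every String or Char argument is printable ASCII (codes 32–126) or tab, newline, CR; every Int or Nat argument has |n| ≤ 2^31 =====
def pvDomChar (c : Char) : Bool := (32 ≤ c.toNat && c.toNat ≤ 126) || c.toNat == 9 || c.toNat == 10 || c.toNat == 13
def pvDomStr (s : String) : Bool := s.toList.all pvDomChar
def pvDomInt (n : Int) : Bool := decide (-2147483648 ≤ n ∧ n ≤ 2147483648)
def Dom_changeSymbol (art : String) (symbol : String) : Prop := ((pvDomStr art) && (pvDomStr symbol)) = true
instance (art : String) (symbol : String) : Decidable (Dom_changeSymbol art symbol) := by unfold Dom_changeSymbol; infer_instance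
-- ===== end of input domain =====

-- B replaces A's per-character loop-and-append with a translation table over the distinct
-- characters plus one translate pass (objective: idiomatic).

-- ===== PORT A =====
-- A: loop over art, append symbol for non-' '/'\n' chars, else the char itself.
def changeSymbol (art : String) (symbol : String) : String :=
  String.mk (art.toList.foldl
    (fun acc c => acc ++ (if c ≠ '\n' ∧ c ≠ ' ' then symbol.toList else [c])) [])

-- ===== PORT B =====
-- B: table = {ord(c): symbol for c in set(art) if c != '\n' and c != ' '}; art.translate(table)
-- (translate maps each char c of art to table.get(ord(c), c); the Dict built over the Set is
-- only looked up afterwards, so the result does not depend on set iteration order).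
def changeSymbol_alt (art : String) (symbol : String) : String :=
  let table : PySem.Dict Nat (List Char) :=
    (PySem.Set.ofList art.toList).foldl
      (fun d c => if c ≠ '\n' ∧ c ≠ ' ' then d.insert c.toNat symbol.toList else d)
      PySem.Dict.empty
  String.mk ((art.toList.map (fun c => table.getD c.toNat [c])).flatten)

-- ===== PRECONDITION & SPEC =====
def Spec_changeSymbol (art : String) (symbol : String) (out : String) : Prop := out = changeSymbol_alt art symbol
instance (art : String) (symbol : String) (out : String) : Decidable (Spec_changeSymbol art symbol out) := by unfold Spec_changeSymbol; infer_instance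

-- ===== CLAIM (what is proved, stated in full; the proofs are below) =====
def Claim_equal_changeSymbol : Prop := ∀ (art : String) (symbol : String), Dom_changeSymbol art symbol → Spec_changeSymbol art symbol (changeSymbol art symbol)

-- ===== LEMMAS AND PROOFS =====

-- ord is injective on Char
theorem pv_toNat_inj {c d : Char} (h : c.toNat = d.toNat) : c = d := by
  apply Char.ext
  exact UInt32.toNat_inj.mp h

-- the table built over any list L answers: symbol for a key of some non-ws char of L, else falls through
theorem pv_table_getD (symbol : String) (L : List Char) (d : PySem.Dict Nat (List Char))
    (k : Nat) (dflt : List Char) :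
    (L.foldl (fun d c => if c ≠ '\n' ∧ c ≠ ' ' then d.insert c.toNat symbol.toList else d) d).getD k dflt
      = if ∃ c ∈ L, (c ≠ '\n' ∧ c ≠ ' ') ∧ c.toNat = k then symbol.toList else d.getD k dflt := by
  induction L generalizing d with
  | nil => simp
  | cons c L ih =>
    simp only [List.foldl_cons]
    by_cases hc : c ≠ '\n' ∧ c ≠ ' '
    · rw [if_pos hc, ih, PySem.Dict.getD_insert]
      by_cases hk : k = c.toNat
      · have hex : ∃ x ∈ c :: L, (x ≠ '\n' ∧ x ≠ ' ') ∧ x.toNat = k :=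
          ⟨c, List.mem_cons_self, hc, hk.symm⟩
        rw [if_pos hex, if_pos hk]
        split_ifs <;> rfl
      · rw [if_neg hk]
        have hiff : (∃ x ∈ L, (x ≠ '\n' ∧ x ≠ ' ') ∧ x.toNat = k)
            ↔ (∃ x ∈ c :: L, (x ≠ '\n' ∧ x ≠ ' ') ∧ x.toNat = k) := by
          constructor
          · rintro ⟨x, hx, h⟩; exact ⟨x, List.mem_cons_of_mem _ hx, h⟩
          · rintro ⟨x, hx, hP, hxk⟩
            rcases List.mem_cons.mp hx with rfl | hx
            · exact absurd hxk.symm hk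
            · exact ⟨x, hx, hP, hxk⟩
        simp only [hiff]
    · rw [if_neg hc, ih]
      have hiff : (∃ x ∈ L, (x ≠ '\n' ∧ x ≠ ' ') ∧ x.toNat = k)
          ↔ (∃ x ∈ c :: L, (x ≠ '\n' ∧ x ≠ ' ') ∧ x.toNat = k) := by
        constructor
        · rintro ⟨x, hx, h⟩; exact ⟨x, List.mem_cons_of_mem _ hx, h⟩
        · rintro ⟨x, hx, hP, hxk⟩
          rcases List.mem_cons.mp hx with rfl | hx
          · exact absurd hP hc
          · exact ⟨x, hx, hP, hxk⟩
      simp only [hiff]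

-- A's accumulate-by-append loop is flatten of the per-character map
theorem pv_foldl_append (f : Char → List Char) (L : List Char) (init : List Char) :
    L.foldl (fun acc c => acc ++ f c) init = init ++ (L.map f).flatten := by
  induction L generalizing init with
  | nil => simp
  | cons c L ih => simp [ih, List.append_assoc]

theorem changeSymbol_spec : Claim_equal_changeSymbol := by
  intro art symbol _
  unfold Spec_changeSymbol changeSymbol changeSymbol_alt
  rw [pv_foldl_append]
  simp only [List.nil_append]
  congr 1
  congr 1
  apply List.map_congr_left
  intro c hc
  rw [pv_table_getD]
  split_ifs with h1 h2 h3
  · rfl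
  · exact absurd ⟨c, (PySem.Set.mem_ofList _ _).mpr hc, h1, rfl⟩ h2
  · obtain ⟨x, _, hxc, hxk⟩ := h3
    exact absurd (pv_toNat_inj hxk ▸ hxc) h1
  · simp [PySem.Dict.getD_empty]
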